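-- pv_equiv track=rewrite | github.com/Murazakl/main | I33/tp4bis.py | eval_poly_F2
-- ===== SOURCE A (Python) =====
-- def eval_poly_F2(P,b):
--     i = 0
--     j = len(P) - 1
--     s = P[j]
--     while i < len(P) and j > 0:
--         s = (s & b) ^ P[j-1]
--         i += 1
--         j -= 1
--     return s
-- ===== SOURCE B (Python) =====
-- def eval_poly_F2(P, b):
--     acc = 0
--     for c in P[1:]:
--         acc ^= c
--     return P[0] ^ (b & acc)
-- ===== Notes on version B (the rewrite author's own statement) =====
-- stated objective: simpler
-- what changed: Replaces the Horner-style while loop (repeatedly AND-ing the accumulator with b) by a closed form: since (x&b)&b = x&b and & distributes over ^, the whole recurrence collapses to P[0] ^ (b & (P[1]^...^P[-1])), computed with a single XOR accumulation over the tail.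
import Mathlib
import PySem

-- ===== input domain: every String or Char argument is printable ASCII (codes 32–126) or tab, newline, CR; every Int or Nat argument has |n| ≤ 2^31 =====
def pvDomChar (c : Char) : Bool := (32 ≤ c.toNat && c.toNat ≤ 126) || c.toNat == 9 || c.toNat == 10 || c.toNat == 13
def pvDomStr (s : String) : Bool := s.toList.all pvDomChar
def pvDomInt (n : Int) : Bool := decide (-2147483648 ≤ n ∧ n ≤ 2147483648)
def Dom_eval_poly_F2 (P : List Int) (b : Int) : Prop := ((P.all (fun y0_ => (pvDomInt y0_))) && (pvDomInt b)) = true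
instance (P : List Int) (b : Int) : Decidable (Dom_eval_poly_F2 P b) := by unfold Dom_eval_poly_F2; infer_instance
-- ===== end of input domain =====

-- B replaces A's Horner-style while loop by the closed form P[0] ^ (b & (P[1] ^ ... ^ P[-1])); objective: simpler.

-- ===== PORT A =====
def evalPolyLoop (P : List Int) (b : Int) (i j : Nat) (s : Int) : Int :=
  if i < P.length ∧ 0 < j then
    evalPolyLoop P b (i + 1) (j - 1)
      (PySem.Int.bxor (PySem.Int.band s b) (PySem.List.pyGetD P ((j : Int) - 1) 0))
  else s
termination_by j

def eval_poly_F2 (P : List Int) (b : Int) : Int :=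
  evalPolyLoop P b 0 (P.length - 1) (PySem.List.pyGetD P ((P.length : Int) - 1) 0)

-- ===== PORT B =====
def eval_poly_F2_alt (P : List Int) (b : Int) : Int :=
  let acc := (PySem.List.slice P (some 1) none).foldl (fun a c => PySem.Int.bxor a c) 0
  PySem.Int.bxor (PySem.List.pyGetD P 0 0) (PySem.Int.band b acc)

-- ===== PRECONDITION & SPEC =====
-- Pre_ excludes only the empty list, on which A raises IndexError at P[len(P)-1] (and B at P[0]).
def Pre_eval_poly_F2 (P : List Int) (b : Int) : Prop := P ≠ []
instance (P : List Int) (b : Int) : Decidable (Pre_eval_poly_F2 P b) := by unfold Pre_eval_poly_F2; infer_instance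
def pvWitness_eval_poly_F2 : List Int × Int := ([1, 0, 1], 1)

def Spec_eval_poly_F2 (P : List Int) (b : Int) (out : Int) : Prop := out = eval_poly_F2_alt P b
instance (P : List Int) (b : Int) (out : Int) : Decidable (Spec_eval_poly_F2 P b out) := by unfold Spec_eval_poly_F2; infer_instance

-- ===== CLAIM (what is proved, stated in full; the proofs are below) =====
def Claim_equal_eval_poly_F2 : Prop := ∀ (P : List Int) (b : Int), Dom_eval_poly_F2 P b → Pre_eval_poly_F2 P b → Spec_eval_poly_F2 P b (eval_poly_F2 P b)

-- ===== LEMMAS AND PROOFS =====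

-- bitwise groundwork: bridge PySem's band/bxor to Mathlib's Int.land/Int.xor, then reason by testBit
theorem nat_and_disj_xor_eq_add : ∀ x y : Nat, x &&& y = 0 → x ^^^ y = x + y := by
  intro x
  induction x using Nat.binaryRec with
  | zero => intro y h; simp
  | bit bx n ih =>
    intro y
    induction y using Nat.binaryRec with
    | zero => intro h; simp
    | bit by' m _ =>
      intro h
      rw [Nat.land_bit, Nat.bit_eq_zero_iff] at h
      rw [Nat.xor_bit]
      have h2 := ih m h.1
      rw [Nat.bit_val, Nat.bit_val, Nat.bit_val, h2]
      cases bx <;> cases by' <;> simp_all <;> omega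

theorem nat_sub_and_eq_ldiff (m n : Nat) : m - (m &&& n) = Nat.ldiff m n := by
  have hd : (Nat.ldiff m n) &&& (m &&& n) = 0 := by
    apply Nat.eq_of_testBit_eq; intro i
    simp only [Nat.testBit_and, Nat.testBit_ldiff, Nat.zero_testBit]
    cases m.testBit i <;> cases n.testBit i <;> rfl
  have hx : (Nat.ldiff m n) ^^^ (m &&& n) = m := by
    apply Nat.eq_of_testBit_eq; intro i
    simp only [Nat.testBit_xor, Nat.testBit_and, Nat.testBit_ldiff]
    cases m.testBit i <;> cases n.testBit i <;> rfl
  have := nat_and_disj_xor_eq_add _ _ hd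
  omega

theorem int_testBit_ext (m n : Int) (h : ∀ k, m.testBit k = n.testBit k) : m = n := by
  have big : ∀ a b : Nat, (∀ k, (Int.ofNat a).testBit k = (Int.negSucc b).testBit k) → False := by
    intro a b hab
    have hk := hab (a + b + 1)
    have h1 : a < 2 ^ (a + b + 1) := lt_of_le_of_lt (Nat.le_add_right a (b + 1)) (by
      have := Nat.lt_two_pow_self (n := a + b + 1); omega)
    have h2 : b < 2 ^ (a + b + 1) := lt_of_le_of_lt (by omega) (Nat.lt_two_pow_self (n := a + b + 1))
    simp [Int.testBit, Nat.testBit_eq_false_of_lt h1, Nat.testBit_eq_false_of_lt h2] at hk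
  cases m with
  | ofNat a =>
    cases n with
    | ofNat c =>
      congr 1
      apply Nat.eq_of_testBit_eq; intro i
      have := h i; simpa [Int.testBit] using this
    | negSucc c => exact absurd h (fun hh => big a c hh)
  | negSucc a =>
    cases n with
    | ofNat c => exact absurd (fun k => (h k).symm) (fun hh => big c a hh)
    | negSucc c =>
      congr 1
      apply Nat.eq_of_testBit_eq; intro i
      have := h i; simpa [Int.testBit] using this

theorem band_eq_land (a b : Int) : PySem.Int.band a b = Int.land a b := by
  cases a with
  | ofNat m =>
    cases b with
    | ofNat n => simp [PySem.Int.band, Int.land]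
    | negSucc n =>
      simp [PySem.Int.band, Int.land, Int.negSucc_not_nonneg]
      exact nat_sub_and_eq_ldiff m n
  | negSucc m =>
    cases b with
    | ofNat n =>
      simp [PySem.Int.band, Int.land, Int.negSucc_not_nonneg]
      exact nat_sub_and_eq_ldiff n m
    | negSucc n =>
      simp [PySem.Int.band, Int.land, Int.negSucc_not_nonneg]
      rw [Int.negSucc_eq]; ring

theorem bxor_eq_xor (a b : Int) : PySem.Int.bxor a b = Int.xor a b := by
  cases a with
  | ofNat m =>
    cases b with
    | ofNat n => simp [PySem.Int.bxor, Int.xor]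
    | negSucc n =>
      simp [PySem.Int.bxor, Int.xor, Int.negSucc_not_nonneg]
      rw [Int.negSucc_eq]; ring
  | negSucc m =>
    cases b with
    | ofNat n =>
      simp [PySem.Int.bxor, Int.xor, Int.negSucc_not_nonneg]
      rw [Int.negSucc_eq]; ring
    | negSucc n =>
      simp [PySem.Int.bxor, Int.xor, Int.negSucc_not_nonneg]

-- the two bitwise-algebra identities the induction needs (proved by testBit extensionality)
theorem bit_alg1 (b s t X p : Int) :
    PySem.Int.bxor (PySem.Int.band b (PySem.Int.bxor (PySem.Int.bxor (PySem.Int.band s b) t) X)) p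
      = PySem.Int.bxor (PySem.Int.band b (PySem.Int.bxor s (PySem.Int.bxor X t))) p := by
  simp only [band_eq_land, bxor_eq_xor]
  apply int_testBit_ext; intro k
  simp only [Int.testBit_lxor, Int.testBit_land]
  cases b.testBit k <;> cases s.testBit k <;> cases t.testBit k <;> cases X.testBit k <;> cases p.testBit k <;> rfl

theorem bit_alg2 (b s X p : Int) :
    PySem.Int.bxor (PySem.Int.band b (PySem.Int.bxor s X)) p
      = PySem.Int.bxor p (PySem.Int.band b (PySem.Int.bxor X s)) := by
  simp only [band_eq_land, bxor_eq_xor]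
  apply int_testBit_ext; intro k
  simp only [Int.testBit_lxor, Int.testBit_land]
  cases b.testBit k <;> cases s.testBit k <;> cases X.testBit k <;> cases p.testBit k <;> rfl

-- XOR of the first m tail elements
def xt (T : List Int) (m : Nat) : Int := (T.take m).foldl (fun a c => PySem.Int.bxor a c) 0

theorem xt_succ (T : List Int) (k : Nat) (h : k < T.length) :
    xt T (k + 1) = PySem.Int.bxor (xt T k) (T.getD k 0) := by
  unfold xt
  rw [List.take_add_one, List.getElem?_eq_getElem h]
  rw [List.foldl_append]
  simp [List.getD_eq_getElem?_getD, List.getElem?_eq_getElem h]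

-- invariant of A's while loop: after the remaining j iterations the result is b & (s ^ P[1..j-1]) ^ P[0]
theorem loop_eq (p b : Int) (T : List Int) :
    ∀ j : Nat, 1 ≤ j → j ≤ T.length → ∀ i s, i + j = T.length →
      evalPolyLoop (p :: T) b i j s =
        PySem.Int.bxor (PySem.Int.band b (PySem.Int.bxor s (xt T (j - 1)))) p := by
  intro j h1
  induction j, h1 using Nat.le_induction with
  | base =>
    intro _ i s hi
    rw [evalPolyLoop]
    have hc : i < (p :: T).length ∧ 0 < 1 := by simp; omega
    rw [if_pos hc]
    rw [evalPolyLoop]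
    simp only [show (1 : Nat) - 1 = 0 from rfl]
    rw [if_neg (by simp)]
    rw [show ((((1 : Nat)) : Int) - 1) = 0 by norm_num, PySem.List.pyGetD_zero_cons]
    simp [xt, PySem.Int.bxor_zero, PySem.Int.band_comm s b]
  | succ j hj ih =>
    intro hle i s hi
    rw [evalPolyLoop]
    have hc : i < (p :: T).length ∧ 0 < j + 1 := by simp; omega
    rw [if_pos hc]
    have hidx : ((((j : Nat) + 1 : Nat) : Int) - 1) = ((j : Nat) : Int) := by push_cast; ring
    rw [hidx, PySem.List.pyGetD_natCast]
    have hgetd : (p :: T).getD j 0 = T.getD (j - 1) 0 := by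
      obtain ⟨j', rfl⟩ : ∃ j', j = j' + 1 := ⟨j - 1, by omega⟩
      simp
    rw [hgetd]
    have hrec := ih (by omega) (i + 1) (PySem.Int.bxor (PySem.Int.band s b) (T.getD (j - 1) 0)) (by omega)
    simp only [Nat.add_sub_cancel]
    rw [hrec]
    have hxt : xt T j = PySem.Int.bxor (xt T (j - 1)) (T.getD (j - 1) 0) := by
      have := xt_succ T (j - 1) (by omega)
      rwa [show j - 1 + 1 = j by omega] at this
    rw [hxt]
    exact bit_alg1 b s (T.getD (j - 1) 0) (xt T (j - 1)) p

theorem xt_top (T : List Int) (h : T ≠ []) :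
    T.foldl (fun a c => PySem.Int.bxor a c) 0
      = PySem.Int.bxor (xt T (T.length - 1)) (T.getD (T.length - 1) 0) := by
  have hlen : 0 < T.length := List.length_pos_iff.mpr h
  have h1 := xt_succ T (T.length - 1) (by omega)
  rw [show T.length - 1 + 1 = T.length by omega] at h1
  rw [← h1]
  unfold xt
  rw [List.take_length]

theorem eval_eq_alt (P : List Int) (b : Int) (hpre : P ≠ []) :
    eval_poly_F2 P b = eval_poly_F2_alt P b := by
  cases P with
  | nil => exact absurd rfl hpre
  | cons p T =>
    unfold eval_poly_F2 eval_poly_F2_alt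
    simp only [PySem.List.slice_from_one, List.tail_cons]
    cases T with
    | nil =>
      rw [evalPolyLoop]
      simp [PySem.Int.band_zero, PySem.Int.bxor_zero, PySem.List.pyGetD_zero_cons]
    | cons t0 T' =>
      have hlen : (p :: t0 :: T').length - 1 = (t0 :: T').length := by simp
      have hcast : (((p :: t0 :: T').length : Int) - 1) = (((t0 :: T').length : Nat) : Int) := by
        simp only [List.length_cons]; push_cast; ring
      rw [hlen, hcast, PySem.List.pyGetD_natCast]
      have hget : (p :: t0 :: T').getD (t0 :: T').length 0 = (t0 :: T').getD ((t0 :: T').length - 1) 0 := by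
        simp
        rfl
      rw [hget]
      rw [loop_eq p b (t0 :: T') (t0 :: T').length (by simp) (le_refl _) 0 _ (by omega)]
      rw [PySem.List.pyGetD_zero_cons]
      rw [xt_top (t0 :: T') (by simp)]
      exact bit_alg2 b ((t0 :: T').getD ((t0 :: T').length - 1) 0) (xt (t0 :: T') ((t0 :: T').length - 1)) p

-- ===== VERDICT (by name: the statement is the Claim_ definition above) =====
theorem eval_poly_F2_spec : Claim_equal_eval_poly_F2 := by
  intro P b _ hpre
  unfold Spec_eval_poly_F2
  exact eval_eq_alt P b hpre
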